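-- pv_equiv track=rewrite | github.com/ClementMoreau-UnivTours/Stage_EMD | CED/Main.py | stop_move
-- ===== SOURCE A (Python) =====
-- def stop_move(s):
--     """
--     :param s: Mobility Sequence
--     :return: Two Sequences STOP and MOVE
--     """
--     stop = []
--     move = []
--     move_set = []
--     for x in s:
--         if x < 100 : # If id of activity is >= 100, it's a move activity
--             stop.append(x)
--             if move_set:
--                 move.append(set(move_set))
--             move_set.clear()
--         else :
--             move_set.append(x)
--     return [stop,move]
-- ===== SOURCE B (Python) =====
-- def stop_move(s):
--     """
--     :param s: Mobility Sequence
--     :return: Two Sequences STOP and MOVE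
--     """
--     # Phase 1: split s into maximal runs of equal kind (stop run: x < 100).
--     runs = []
--     cur = []
--     prev = None
--     for x in s:
--         k = x < 100
--         if prev is not None and k != prev:
--             runs.append((prev, cur))
--             cur = []
--         cur.append(x)
--         prev = k
--     if prev:  # keep a trailing stop run; a trailing move run is dropped (as in A)
--         runs.append((prev, cur))
--     # Phase 2: derive the two sequences from the run list.
--     stop = [x for k, run in runs if k for x in run]
--     move = [set(run) for k, run in runs if not k]
--     return [stop, move]
-- ===== Notes on version B (the rewrite author's own statement) =====
-- stated objective: alternative
-- what changed: B first materialises the list of maximal (is_stop, run) runs in one grouping pass, drops a trailing move run, then derives stop by flattening the stop runs and move by mapping set over the move runs, instead of A's single pass that threads stop/move/move_set accumulators.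
import Mathlib
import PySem

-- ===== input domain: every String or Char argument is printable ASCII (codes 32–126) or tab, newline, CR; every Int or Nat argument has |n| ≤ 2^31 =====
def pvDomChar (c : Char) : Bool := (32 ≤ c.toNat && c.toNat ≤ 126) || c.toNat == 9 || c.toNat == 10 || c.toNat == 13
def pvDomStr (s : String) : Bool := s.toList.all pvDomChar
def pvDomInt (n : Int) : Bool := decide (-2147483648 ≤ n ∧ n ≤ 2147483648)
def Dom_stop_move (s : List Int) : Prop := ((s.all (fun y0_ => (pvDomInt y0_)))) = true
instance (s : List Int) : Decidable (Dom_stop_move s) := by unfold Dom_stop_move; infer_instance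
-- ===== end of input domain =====

-- B re-groups the sequence into maximal runs first and derives both outputs from the
-- run list (alternative decomposition, same cost); A threads three accumulators in one pass.

-- ===== PORT A =====
-- state: (stop, move, move_set)
def stepA (st : List Int × List (List Int) × List Int) (x : Int) :
    List Int × List (List Int) × List Int :=
  if x < 100 then
    (st.1 ++ [x], (if st.2.2 ≠ [] then st.2.1 ++ [PySem.Set.ofList st.2.2] else st.2.1),
      ([] : List Int))
  else
    (st.1, st.2.1, st.2.2 ++ [x])

def stop_move (s : List Int) : List Int × List (List Int) :=
  let r := s.foldl stepA ([], [], [])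
  (r.1, r.2.1)

-- ===== PORT B =====
-- state: (runs, cur, prev)
def stepB (st : List (Bool × List Int) × List Int × Option Bool) (x : Int) :
    List (Bool × List Int) × List Int × Option Bool :=
  let k := decide (x < 100)
  let st' := match st.2.2 with
    | some p => if k ≠ p then (st.1 ++ [(p, st.2.1)], ([] : List Int), st.2.2) else st
    | none => st
  (st'.1, st'.2.1 ++ [x], some k)

def stop_move_alt (s : List Int) : List Int × List (List Int) :=
  let st := s.foldl stepB ([], [], none)
  let runs := match st.2.2 with
    | some true => st.1 ++ [(true, st.2.1)]
    | _ => st.1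
  ((runs.filter fun r => r.1).flatMap (fun r => r.2),
   (runs.filter fun r => !r.1).map (fun r => PySem.Set.ofList r.2))

-- ===== PRECONDITION & SPEC =====
def Spec_stop_move (s : List Int) (out : List Int × List (List Int)) : Prop := out = stop_move_alt s
instance (s : List Int) (out : List Int × List (List Int)) : Decidable (Spec_stop_move s out) := by unfold Spec_stop_move; infer_instance

-- ===== CLAIM (what is proved, stated in full; the proofs are below) =====
def Claim_equal_stop_move : Prop := ∀ (s : List Int), Dom_stop_move s → Spec_stop_move s (stop_move s)

-- ===== LEMMAS AND PROOFS =====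

def stopOf (rs : List (Bool × List Int)) : List Int :=
  (rs.filter fun r => r.1).flatMap (fun r => r.2)

def moveOf (rs : List (Bool × List Int)) : List (List Int) :=
  (rs.filter fun r => !r.1).map (fun r => PySem.Set.ofList r.2)

def allruns (runs : List (Bool × List Int)) (cur : List Int) (prev : Option Bool) :
    List (Bool × List Int) :=
  match prev with
  | some k => runs ++ [(k, cur)]
  | none => runs

def StInv (a : List Int × List (List Int) × List Int)
    (b : List (Bool × List Int) × List Int × Option Bool) : Prop :=
  a.1 = stopOf (allruns b.1 b.2.1 b.2.2) ∧
  a.2.1 = moveOf b.1 ∧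
  a.2.2 = (if b.2.2 = some false then b.2.1 else []) ∧
  (b.2.2 = none → b.1 = [] ∧ b.2.1 = []) ∧
  (b.2.2.isSome → b.2.1 ≠ [])

theorem step_inv (a : List Int × List (List Int) × List Int)
    (b : List (Bool × List Int) × List Int × Option Bool) (x : Int)
    (h : StInv a b) : StInv (stepA a x) (stepB b x) := by
  obtain ⟨h1, h2, h3, h4, h5⟩ := h
  obtain ⟨stop, move, mset⟩ := a
  obtain ⟨runs, cur, prev⟩ := b
  simp only at h1 h2 h3 h4 h5
  match prev with
  | none =>
    obtain ⟨hr, hc⟩ := h4 rfl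
    subst hr hc
    by_cases hx : x < 100 <;>
      simp [StInv, stepA, stepB, hx, h1, h2, h3, allruns, stopOf, moveOf]
  | some p =>
    have hcur : cur ≠ [] := h5 rfl
    match p with
    | true =>
      simp only [if_neg (by simp : ¬ (some (true : Bool) = some false))] at h3
      by_cases hx : x < 100 <;>
        simp [StInv, stepA, stepB, hx, h1, h2, h3, allruns, stopOf, moveOf,
          List.filter_append, List.flatMap_append]
    | false =>
      subst h3
      by_cases hx : x < 100 <;>
        simp [StInv, stepA, stepB, hx, h1, h2, hcur, allruns, stopOf, moveOf,
          List.filter_append, List.flatMap_append]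

theorem foldl_inv (s : List Int) (a : List Int × List (List Int) × List Int)
    (b : List (Bool × List Int) × List Int × Option Bool) (h : StInv a b) :
    StInv (s.foldl stepA a) (s.foldl stepB b) := by
  induction s generalizing a b with
  | nil => exact h
  | cons x t ih => exact ih _ _ (step_inv a b x h)

-- ===== VERDICT (by name: the statement is the Claim_ definition above) =====
theorem stop_move_spec : Claim_equal_stop_move := by
  intro s _
  unfold Spec_stop_move stop_move stop_move_alt
  have h := foldl_inv s ([], [], []) ([], [], none)
    (by simp [StInv, allruns, stopOf, moveOf])
  set b := s.foldl stepB ([], [], none) with hb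
  obtain ⟨runs, cur, prev⟩ := b
  obtain ⟨h1, h2, h3, h4, h5⟩ := h
  simp only at h1 h2 h3 h4 h5 ⊢
  match prev with
  | none =>
    obtain ⟨hr, hc⟩ := h4 rfl
    refine Prod.ext ?_ ?_
    · simpa [allruns, hr, stopOf] using h1
    · simpa [hr, moveOf] using h2
  | some true =>
    refine Prod.ext ?_ ?_
    · simpa [allruns, stopOf, List.filter_append, List.flatMap_append] using h1
    · simpa [moveOf, List.filter_append] using h2
  | some false =>
    refine Prod.ext ?_ ?_
    · simpa [allruns, stopOf, List.filter_append, List.flatMap_append] using h1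
    · simpa [moveOf] using h2
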